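-- pv_equiv track=rewrite | github.com/uthantvicentin/CAES | process_data.py | putinorder
-- ===== SOURCE A (Python) =====
-- def putinorder(files, order):
--     temp = [""] * len(order)
--     for i in range(len(order)):
--         for file in files:
--             if order[i] in file:
--                 temp[i] = file
--                 break
--     return temp
-- ===== SOURCE B (Python) =====
-- def putinorder(files, order):
--     # Inverted loop nesting: one pass over files with a shrinking worklist of
--     # still-unmatched key indices (not the "" sentinel, so an '' key matched by an
--     # earlier file is never overwritten); early exit once every key is matched.
--     temp = [""] * len(order)
--     pending = list(range(len(order)))
--     for f in files:
--         still = []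
--         for i in pending:
--             if order[i] in f:
--                 temp[i] = f
--             else:
--                 still.append(i)
--         pending = still
--         if not pending:
--             break
--     return temp
-- ===== Notes on version B (the rewrite author's own statement) =====
-- stated objective: alternative
-- what changed: Loop nesting inverted: instead of scanning all files per order key with a break, B makes one pass over files, pointwise-updating a temp list and a separate done-flag list across all keys (so an '' key matched by an earlier file is not overwritten), with an early exit once every key is matched.
import Mathlib
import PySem

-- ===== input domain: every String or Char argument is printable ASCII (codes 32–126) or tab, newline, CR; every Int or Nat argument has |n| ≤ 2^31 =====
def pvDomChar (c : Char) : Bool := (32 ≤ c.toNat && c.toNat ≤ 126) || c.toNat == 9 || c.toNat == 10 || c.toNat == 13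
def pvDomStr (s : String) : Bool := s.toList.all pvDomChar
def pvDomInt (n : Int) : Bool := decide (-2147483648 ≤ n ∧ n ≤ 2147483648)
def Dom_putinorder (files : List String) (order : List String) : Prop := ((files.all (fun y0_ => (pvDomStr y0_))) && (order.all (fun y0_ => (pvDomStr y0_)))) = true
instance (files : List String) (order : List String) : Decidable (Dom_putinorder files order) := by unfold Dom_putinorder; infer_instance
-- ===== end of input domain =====

-- B inverts the loop nesting: one pass over files with a shrinking worklist of
-- still-unmatched key indices, early exit when all are matched; same result, alternative structure.

-- ===== PORT A =====
-- inner 'for file in files: if order[i] in file: temp[i] = file; break'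
-- (i is produced by range(len(order)), so order[i]/temp[i] are always in range;
--  pyGetD's "" default is unreachable)
def putinorderScan (order : List String) (i : Int) (temp : List String) : List String → List String
  | [] => temp
  | f :: fs =>
    if PySem.Str.isIn (PySem.List.pyGetD order i "") f then PySem.List.pySetD temp i f
    else putinorderScan order i temp fs

def putinorder (files : List String) (order : List String) : List String :=
  (PySem.List.pyRange 0 order.length 1).foldl
    (fun temp i => putinorderScan order i temp files)
    (List.replicate order.length "")

-- ===== PORT B =====
-- inner 'for i in pending: if order[i] in f: temp[i] = f else: still.append(i)'
def putinorderInner (order : List String) (f : String) :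
    List Int → List String → List Int → List String × List Int
  | [], temp, still => (temp, still)
  | i :: rest, temp, still =>
    if PySem.Str.isIn (PySem.List.pyGetD order i "") f then
      putinorderInner order f rest (PySem.List.pySetD temp i f) still
    else
      putinorderInner order f rest temp (still ++ [i])

-- outer 'for f in files: …; pending = still; if not pending: break'
def putinorderAltLoop (order : List String) :
    List String → List String → List Int → List String
  | [], temp, _ => temp
  | f :: fs, temp, pending =>
    match putinorderInner order f pending temp [] with
    | (temp', still) =>
      if still.isEmpty then temp' else putinorderAltLoop order fs temp' still

def putinorder_alt (files : List String) (order : List String) : List String :=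
  putinorderAltLoop order files (List.replicate order.length "")
    (PySem.List.pyRange 0 order.length 1)

-- ===== PRECONDITION & SPEC =====
def Spec_putinorder (files : List String) (order : List String) (out : List String) : Prop := out = putinorder_alt files order
instance (files : List String) (order : List String) (out : List String) : Decidable (Spec_putinorder files order out) := by unfold Spec_putinorder; infer_instance

-- ===== CLAIM (what is proved, stated in full; the proofs are below) =====
def Claim_equal_putinorder : Prop := ∀ (files : List String) (order : List String), Dom_putinorder files order → Spec_putinorder files order (putinorder files order)

-- ===== LEMMAS AND PROOFS =====

-- first file containing k, else "" — the common characterisation of both ports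
def pvFirst (files : List String) (k : String) : String :=
  match files.find? (fun f => PySem.Str.isIn k f) with
  | some f => f
  | none => ""

-- getD below index is getElem
theorem getD_lt {xs : List String} {j : Nat} (h : j < xs.length) : xs.getD j "" = xs[j] := by
  rw [List.getD_eq_getElem?_getD, List.getElem?_eq_getElem h]
  rfl

-- pvFirst with an arbitrary default (the not-yet-matched temp entry)
def pvFirstD (files : List String) (k : String) (d : String) : String :=
  match files.find? (fun f => PySem.Str.isIn k f) with
  | some f => f
  | none => d

theorem inner_length (order : List String) (f : String) :
    ∀ (pending : List Int) (temp : List String) (still : List Int),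
    (putinorderInner order f pending temp still).1.length = temp.length := by
  intro pending
  induction pending with
  | nil => intro temp still; rfl
  | cons i rest ih =>
    intro temp still
    by_cases h : PySem.Chars.isIn (PySem.List.pyGetD order i "").toList f.toList = true
    · rw [putinorderInner, if_pos (by simpa using h), ih]
      exact PySem.List.length_pySetD ..
    · rw [putinorderInner, if_neg (by simpa using h), ih]

theorem inner_still (order : List String) (f : String) :
    ∀ (pending : List Int) (temp : List String) (still : List Int),
    (putinorderInner order f pending temp still).2
    = still ++ pending.filter (fun i => !PySem.Str.isIn (PySem.List.pyGetD order i "") f) := by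
  intro pending
  induction pending with
  | nil => intro temp still; simp [putinorderInner]
  | cons i rest ih =>
    intro temp still
    by_cases h : PySem.Chars.isIn (PySem.List.pyGetD order i "").toList f.toList = true
    · rw [putinorderInner, if_pos (by simpa using h), ih]
      simp [h]
    · rw [putinorderInner, if_neg (by simpa using h), ih]
      simp [h]

theorem inner_temp (order : List String) (f : String) (n : Nat) :
    ∀ (pending : List Int) (temp : List String) (still : List Int),
    temp.length = n → (∀ i ∈ pending, 0 ≤ i ∧ i < (n : Int)) →
    ∀ (j : Nat),
    (putinorderInner order f pending temp still).1.getD j ""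
    = if (j : Int) ∈ pending ∧ PySem.Str.isIn (PySem.List.pyGetD order (j : Int) "") f = true
      then f else temp.getD j "" := by
  intro pending
  induction pending with
  | nil => intro temp still _ _ j; simp [putinorderInner]
  | cons i rest ih =>
    intro temp still hlen hb j
    have hi := hb i (List.mem_cons_self ..)
    have hset : PySem.List.pySetD temp i f = temp.set i.toNat f :=
      PySem.List.pySetD_of_nonneg _ _ hi.1
    by_cases h : PySem.Chars.isIn (PySem.List.pyGetD order i "").toList f.toList = true
    · rw [putinorderInner, if_pos (by simpa using h)]
      rw [ih (PySem.List.pySetD temp i f) still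
          (by rw [hset]; simpa using hlen)
          (fun x hx => hb x (List.mem_cons_of_mem _ hx)) j]
      by_cases hij : i = (j : Int)
      · -- order[i] is order[j]; the set hits position j
        have hjt : i.toNat = j := by omega
        have hjl : j < temp.length := by omega
        have hsub : PySem.Str.isIn (PySem.List.pyGetD order (j : Int) "") f = true := by
          rw [← hij]; simpa using h
        by_cases hr : (j : Int) ∈ rest ∧
            PySem.Str.isIn (PySem.List.pyGetD order (j : Int) "") f = true
        · rw [if_pos hr, if_pos ⟨List.mem_cons_of_mem _ hr.1, hr.2⟩]
        · rw [if_neg hr, hset, hjt,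
              if_pos (⟨by rw [hij]; exact List.mem_cons_self .., hsub⟩ :
                ((j : Int) ∈ i :: rest ∧ _)),
              getD_lt (by simpa using hjl), List.getElem_set_self]
      · -- the set misses position j
        have hji : (j : Int) ≠ i := fun e => hij e.symm
        have hmiss : (PySem.List.pySetD temp i f).getD j "" = temp.getD j "" := by
          rw [hset]
          rcases Nat.lt_or_ge j temp.length with hjl | hjl
          · rw [getD_lt hjl, getD_lt (by simpa using hjl), List.getElem_set_ne (by omega)]
          · rw [List.getD_eq_getElem?_getD, List.getD_eq_getElem?_getD,
              List.getElem?_eq_none (by simpa using hjl), List.getElem?_eq_none hjl]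
        rw [hmiss]
        have hiff : ((j : Int) ∈ i :: rest ∧
              PySem.Str.isIn (PySem.List.pyGetD order (j : Int) "") f = true) ↔
            ((j : Int) ∈ rest ∧
              PySem.Str.isIn (PySem.List.pyGetD order (j : Int) "") f = true) :=
          and_congr_left' (by simp [List.mem_cons, hji])
        rw [if_congr hiff rfl rfl]
    · rw [putinorderInner, if_neg (by simpa using h)]
      rw [ih temp (still ++ [i]) hlen
          (fun x hx => hb x (List.mem_cons_of_mem _ hx)) j]
      by_cases hij : i = (j : Int)
      · have hsub : ¬ PySem.Str.isIn (PySem.List.pyGetD order (j : Int) "") f = true := by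
          rw [← hij]; simpa using h
        have hiff : ((j : Int) ∈ i :: rest ∧
              PySem.Str.isIn (PySem.List.pyGetD order (j : Int) "") f = true) ↔
            ((j : Int) ∈ rest ∧
              PySem.Str.isIn (PySem.List.pyGetD order (j : Int) "") f = true) :=
          ⟨fun hc => absurd hc.2 hsub, fun hc => ⟨List.mem_cons_of_mem _ hc.1, hc.2⟩⟩
        rw [if_congr hiff rfl rfl]
      · have hji : (j : Int) ≠ i := fun e => hij e.symm
        have hiff : ((j : Int) ∈ i :: rest ∧
              PySem.Str.isIn (PySem.List.pyGetD order (j : Int) "") f = true) ↔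
            ((j : Int) ∈ rest ∧
              PySem.Str.isIn (PySem.List.pyGetD order (j : Int) "") f = true) :=
          and_congr_left' (by simp [List.mem_cons, hji])
        rw [if_congr hiff rfl rfl]

theorem altLoop_eq (order : List String) (n : Nat) :
    ∀ (fs : List String) (temp : List String) (pending : List Int),
    temp.length = n → (∀ i ∈ pending, 0 ≤ i ∧ i < (n : Int)) →
    putinorderAltLoop order fs temp pending
    = (List.range n).map (fun (j : Nat) =>
        if (j : Int) ∈ pending then pvFirstD fs (order.getD j "") (temp.getD j "")
        else temp.getD j "") := by
  intro fs
  induction fs with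
  | nil =>
    intro temp pending hlen _
    rw [putinorderAltLoop]
    apply List.ext_getElem (by simpa using hlen)
    intro j hj hj'
    simp only [List.getElem_map, List.getElem_range, pvFirstD, List.find?_nil, ite_self]
    exact (getD_lt hj).symm
  | cons f fs ih =>
    intro temp pending hlen hb
    rw [putinorderAltLoop]
    have hstill := inner_still order f pending temp []
    have hlen' : (putinorderInner order f pending temp []).1.length = n := by
      rw [inner_length]; exact hlen
    have htemp := inner_temp order f n pending temp [] hlen hb
    rcases hres : putinorderInner order f pending temp [] with ⟨temp', still⟩
    rw [hres] at hstill hlen' htemp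
    simp only at hstill hlen' htemp
    rw [List.nil_append] at hstill
    dsimp only
    by_cases hemp : still.isEmpty = true
    · rw [if_pos hemp]
      have hall : ∀ i ∈ pending, PySem.Str.isIn (PySem.List.pyGetD order i "") f = true := by
        intro i hi
        have := List.filter_eq_nil_iff.mp (by rw [← hstill]; exact List.isEmpty_iff.mp hemp) i hi
        simpa using this
      apply List.ext_getElem (by simpa using hlen')
      intro j hj hj'
      rw [← getD_lt hj, htemp j]
      simp only [List.getElem_map, List.getElem_range]
      by_cases hjp : (j : Int) ∈ pending
      · have hsub := hall _ hjp
        rw [if_pos ⟨hjp, hsub⟩, if_pos hjp]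
        unfold pvFirstD
        rw [List.find?_cons_of_pos (by rw [← PySem.List.pyGetD_natCast order j]; exact hsub)]
      · rw [if_neg (fun hc => hjp hc.1), if_neg hjp]
    · rw [if_neg hemp]
      have hb' : ∀ i ∈ still, 0 ≤ i ∧ i < (n : Int) := by
        intro i hi
        rw [hstill] at hi
        exact hb i (List.mem_of_mem_filter hi)
      rw [ih temp' still hlen' hb']
      apply List.ext_getElem (by simp)
      intro j hj hj'
      simp only [List.getElem_map, List.getElem_range]
      have hj'' : j < n := by simpa using hj'
      have hmem : ((j : Int) ∈ still) ↔ ((j : Int) ∈ pending ∧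
          ¬ PySem.Str.isIn (PySem.List.pyGetD order (j : Int) "") f = true) := by
        rw [hstill, List.mem_filter]
        simp
      by_cases hjp : (j : Int) ∈ pending
      · by_cases hsub : PySem.Str.isIn (PySem.List.pyGetD order (j : Int) "") f = true
        · have hns : ¬ (j : Int) ∈ still := fun hc => (hmem.mp hc).2 hsub
          rw [if_neg hns, htemp j, if_pos ⟨hjp, hsub⟩, if_pos hjp]
          unfold pvFirstD
          rw [List.find?_cons_of_pos (by rw [← PySem.List.pyGetD_natCast order j]; exact hsub)]
        · have hys : (j : Int) ∈ still := hmem.mpr ⟨hjp, hsub⟩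
          rw [if_pos hys, htemp j, if_neg (fun hc => hsub hc.2), if_pos hjp]
          unfold pvFirstD
          rw [List.find?_cons_of_neg (by rw [← PySem.List.pyGetD_natCast order j]; exact hsub)]
      · have hns : ¬ (j : Int) ∈ still := fun hc => hjp (hmem.mp hc).1
        rw [if_neg hns, htemp j, if_neg (fun hc => hjp hc.1), if_neg hjp]

theorem alt_eq_map (files order : List String) :
    putinorder_alt files order = order.map (pvFirst files) := by
  unfold putinorder_alt
  rw [altLoop_eq order order.length files _ _ (by simp)
      (fun i hi => by
        have := (PySem.List.mem_pyRange_one).mp hi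
        omega)]
  apply List.ext_getElem (by simp)
  intro j hj hj'
  have hjn : j < order.length := by simpa using hj'
  simp only [List.getElem_map, List.getElem_range]
  rw [if_pos (PySem.List.mem_pyRange_one.mpr (by omega))]
  have hrep : (List.replicate order.length "").getD j "" = "" := by
    rw [getD_lt (by simpa using hjn), List.getElem_replicate]
  rw [hrep]
  show pvFirstD files (order.getD j "") "" = pvFirst files order[j]
  rw [getD_lt hjn]
  rfl

theorem scan_eq (order : List String) (i : Int) (temp : List String) (files : List String) :
    putinorderScan order i temp files
    = match files.find? (fun f => PySem.Str.isIn (PySem.List.pyGetD order i "") f) with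
      | some f => PySem.List.pySetD temp i f
      | none => temp := by
  induction files with
  | nil => simp [putinorderScan]
  | cons f fs ih =>
    by_cases h : PySem.Chars.isIn (PySem.List.pyGetD order i "").toList f.toList = true
    · rw [List.find?_cons_of_pos
        (show PySem.Str.isIn (PySem.List.pyGetD order i "") f = true by simpa using h)]
      simp [putinorderScan, h]
    · rw [List.find?_cons_of_neg
        (show ¬ PySem.Str.isIn (PySem.List.pyGetD order i "") f = true by simpa using h)]
      rw [← ih]
      simp only [putinorderScan]
      rw [if_neg (by simpa using h)]

theorem scan_eq_none (order : List String) (i : Int) (temp : List String) (files : List String)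
    (h : files.find? (fun f => PySem.Str.isIn (PySem.List.pyGetD order i "") f) = none) :
    putinorderScan order i temp files = temp := by
  rw [scan_eq, h]

theorem scan_eq_some (order : List String) (i : Int) (temp : List String) (files : List String)
    (f : String)
    (h : files.find? (fun f => PySem.Str.isIn (PySem.List.pyGetD order i "") f) = some f) :
    putinorderScan order i temp files = PySem.List.pySetD temp i f := by
  rw [scan_eq, h]

theorem a_loop (files order : List String) : ∀ (m : Nat), m ≤ order.length →
    (PySem.List.pyRange 0 m 1).foldl
      (fun temp i => putinorderScan order i temp files)
      (List.replicate order.length "")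
    = (List.range order.length).map
        (fun j => if j < m then pvFirst files (order.getD j "") else "") := by
  intro m
  induction m with
  | zero => intro _; simp
  | succ m ih =>
    intro hm
    have hmn : m ≤ order.length := Nat.le_of_succ_le hm
    have hr : PySem.List.pyRange 0 ((m : Int) + 1) 1
        = PySem.List.pyRange 0 m 1 ++ [(m : Int)] :=
      PySem.List.pyRange_one_succ_right (by omega)
    have hcast : ((m + 1 : Nat) : Int) = (m : Int) + 1 := by push_cast; ring
    rw [hcast, hr, List.foldl_append]
    simp only [List.foldl_cons, List.foldl_nil]
    rw [ih hmn]
    have hget : PySem.List.pyGetD order (m : Int) "" = order.getD m "" := by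
      rw [PySem.List.pyGetD_natCast]
    rcases hfind : (files.find? (fun f => PySem.Str.isIn (PySem.List.pyGetD order (m : Int) "") f))
      with _ | f
    · rw [scan_eq_none _ _ _ _ hfind]
      apply List.map_congr_left
      intro j hjr
      by_cases hjm : j = m
      · subst hjm
        rw [if_neg (Nat.lt_irrefl j), if_pos (Nat.lt_succ_self j)]
        unfold pvFirst
        rw [← hget, hfind]
      · have : j < m ↔ j < m + 1 := by omega
        simp [this]
    · rw [scan_eq_some _ _ _ _ _ hfind, PySem.List.pySetD_natCast]
      apply List.ext_getElem (by simp)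
      intro j hj hj'
      rw [List.getElem_set]
      by_cases hjm : j = m
      · subst hjm
        rw [if_pos rfl]
        simp only [List.getElem_map, List.getElem_range]
        rw [if_pos (Nat.lt_succ_self j)]
        unfold pvFirst
        rw [← hget, hfind]
      · rw [if_neg (fun e => hjm e.symm)]
        simp only [List.getElem_map, List.getElem_range]
        have : j < m ↔ j < m + 1 := by omega
        simp [this]

theorem a_eq_map (files order : List String) :
    putinorder files order = order.map (pvFirst files) := by
  unfold putinorder
  rw [a_loop files order order.length (Nat.le_refl _)]
  apply List.ext_getElem (by simp)
  intro j hj hj'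
  simp only [List.length_map] at hj'
  simp only [List.getElem_map, List.getElem_range]
  rw [if_pos hj']
  congr 1
  rw [List.getD_eq_getElem?_getD, List.getElem?_eq_getElem hj']
  rfl

-- ===== VERDICT (by name: the statement is the Claim_ definition above) =====
theorem putinorder_spec : Claim_equal_putinorder := by
  intro files order _
  unfold Spec_putinorder
  rw [a_eq_map, alt_eq_map]
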